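-- pv_equiv track=rewrite | github.com/spacemonkeyinc/htc2015 | utah/solutions/soln/soln.py | getOne
-- ===== SOURCE A (Python) =====
-- def getOne(input):
--   seen_cube = False
--   for line in input:
--     line = line.strip()
--     if not line:
--       if seen_cube:
--         return
--       continue
--     seen_cube = True
--     yield line
-- ===== SOURCE B (Python) =====
-- def getOne(input):
--   mask = [bool(line.strip()) for line in input]
--   if True not in mask:
--     return
--   start = mask.index(True)
--   tail = mask[start:]
--   end = start + (tail.index(False) if False in tail else len(tail))
--   for line in input[start:end]:
--     yield line.strip()
-- ===== Notes on version B (the rewrite author's own statement) =====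
-- stated objective: alternative
-- what changed: Replaces A's flag-driven streaming loop with an index/slice computation: build a boolean non-blank mask, locate the block's start and end with list.index, and yield the stripped slice input[start:end].
import Mathlib
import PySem

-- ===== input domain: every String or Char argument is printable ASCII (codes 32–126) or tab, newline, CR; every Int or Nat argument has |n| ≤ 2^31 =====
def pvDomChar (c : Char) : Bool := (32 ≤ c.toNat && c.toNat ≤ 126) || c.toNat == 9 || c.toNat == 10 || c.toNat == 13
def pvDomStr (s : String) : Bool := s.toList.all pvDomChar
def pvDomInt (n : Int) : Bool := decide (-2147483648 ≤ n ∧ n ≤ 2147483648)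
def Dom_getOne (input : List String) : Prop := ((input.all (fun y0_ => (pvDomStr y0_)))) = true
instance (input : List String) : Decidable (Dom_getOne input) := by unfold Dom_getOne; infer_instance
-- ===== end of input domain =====

-- B replaces A's flag-driven streaming loop with a mask/index/slice computation (alternative, same cost);
-- return-value equivalence only: A is a lazy generator, B materializes the mask eagerly.


-- ===== PORT A =====
def getOneA_go (input : List String) (seen : Bool) : List String :=
  match input with
  | [] => []
  | line :: rest =>
    let l := PySem.Str.strip line
    if l = "" then
      (if seen then [] else getOneA_go rest seen)
    else
      l :: getOneA_go rest true

def getOne (input : List String) : List String := getOneA_go input false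

-- ===== PORT B =====
def getOne_alt (input : List String) : List String :=
  let mask : List Bool := input.map (fun line => PySem.Str.strip line != "")
  if !(mask.contains true) then []
  else
    let start : Nat := (PySem.List.index? mask true).getD 0
    let tail : List Bool := PySem.List.slice mask (some (start : Int)) none
    let stop : Nat := start +
      (if tail.contains false then (PySem.List.index? tail false).getD 0 else tail.length)
    (PySem.List.slice input (some (start : Int)) (some (stop : Int))).map PySem.Str.strip

-- ===== PRECONDITION & SPEC =====
def Spec_getOne (input : List String) (out : List String) : Prop := out = getOne_alt input
instance (input : List String) (out : List String) : Decidable (Spec_getOne input out) := by unfold Spec_getOne; infer_instance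

-- ===== CLAIM (what is proved, stated in full; the proofs are below) =====
def Claim_equal_getOne : Prop := ∀ (input : List String), Dom_getOne input → Spec_getOne input (getOne input)

-- ===== LEMMAS AND PROOFS =====

-- A's flag loop, characterised by dropWhile/takeWhile over the stripped lines.
theorem goA_true (l : List String) :
    getOneA_go l true = (l.map PySem.Str.strip).takeWhile (fun s => s ≠ "") := by
  induction l with
  | nil => rfl
  | cons x xs ih =>
    simp only [getOneA_go, List.map, List.takeWhile]
    by_cases h : PySem.Str.strip x = "" <;> simp [h, ih]

theorem goA_false (l : List String) :
    getOneA_go l false =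
      (((l.map PySem.Str.strip).dropWhile (fun s => s = "")).takeWhile (fun s => s ≠ "")) := by
  induction l with
  | nil => rfl
  | cons x xs ih =>
    simp only [getOneA_go, List.map, List.dropWhile]
    by_cases h : PySem.Str.strip x = "" <;> simp [h, ih, goA_true]

-- generic: dropWhile (!p) as a drop at the mask's first True
theorem dropWhile_eq_drop_index {α : Type} (p : α → Bool) (l : List α)
    (h : true ∈ l.map p) :
    l.dropWhile (fun x => !(p x)) = l.drop ((PySem.List.index? (l.map p) true).getD 0) := by
  induction l with
  | nil => simp at h
  | cons x xs ih =>
    by_cases hp : p x = true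
    · rw [List.map_cons, hp, PySem.List.index?_cons_self]
      simp [hp]
    · have hx : p x = false := by simpa using hp
      have hmem : true ∈ xs.map p := by simpa [hx] using h
      obtain ⟨k, hk⟩ := Option.isSome_iff_exists.mp
        ((PySem.List.index?_isSome_iff (xs.map p) true).mpr hmem)
      rw [List.map_cons, hx, PySem.List.index?_cons_of_ne (xs.map p) (by simp), hk]
      rw [PySem.List.index?_eq_idxOf?] at hk
      simp [hx, ih hmem, hk]

-- generic: takeWhile p as a take at the mask's first False
theorem takeWhile_eq_take_index {α : Type} (p : α → Bool) (l : List α) :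
    l.takeWhile p = l.take
      (if (l.map p).contains false then (PySem.List.index? (l.map p) false).getD 0
       else (l.map p).length) := by
  induction l with
  | nil => simp
  | cons x xs ih =>
    by_cases hp : p x = true
    · rw [List.takeWhile_cons_of_pos hp, List.map_cons, hp, ih]
      by_cases hm : (xs.map p).contains false
      · obtain ⟨k, hk⟩ := Option.isSome_iff_exists.mp
          ((PySem.List.index?_isSome_iff (xs.map p) false).mpr (by simpa using hm))
        rw [PySem.List.index?_cons_of_ne (xs.map p) (by simp), hk]
        rw [PySem.List.index?_eq_idxOf?] at hk
        have hm' : ∃ a ∈ xs, p a = false := by simpa using hm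
        simp [hm', List.take_succ_cons]
      · have hm' : ¬ ∃ a ∈ xs, p a = false := by simpa using hm
        simp [hm', List.take_succ_cons]
    · have hx : p x = false := by simpa using hp
      rw [List.takeWhile_cons_of_neg (by simp [hx]), List.map_cons, hx,
        PySem.List.index?_cons_self]
      simp

-- ===== VERDICT (by name: the statement is the Claim_ definition above) =====
theorem getOne_spec : Claim_equal_getOne := by
  intro input _
  show getOne input = getOne_alt input
  rw [getOne, goA_false, getOne_alt]
  set st := input.map PySem.Str.strip with hst
  set p : String → Bool := fun s => s != "" with hp
  have e1 : (fun s : String => decide (s = "")) = (fun s => !(p s)) := by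
    funext s; by_cases h : s = "" <;> simp [hp, h]
  have e2 : (fun s : String => decide (s ≠ "")) = p := by
    funext s; by_cases h : s = "" <;> simp [hp, h]
  have hmask : input.map (fun line => PySem.Str.strip line != "") = st.map p := by
    simp [hst, hp]
  simp only [hmask, e1, e2]
  by_cases hc : (st.map p).contains true
  · -- there is a non-blank line
    have hmem : true ∈ st.map p := by simpa using hc
    rw [hc, Bool.not_true, if_neg (by simp)]
    set start := (PySem.List.index? (st.map p) true).getD 0 with hstart
    rw [dropWhile_eq_drop_index p st hmem, ← hstart]
    rw [PySem.List.slice_from_natCast]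
    have htail : (st.map p).drop start = (st.drop start).map p := by
      simp [List.map_drop]
    rw [htail]
    set u := st.drop start with hu
    rw [takeWhile_eq_take_index p u]
    rw [PySem.List.slice_natCast, List.map_take]
    have hmd : (input.drop start).map PySem.Str.strip = u := by
      simp [hu, hst, List.map_drop]
    rw [hmd]
    congr 1
    omega
  · -- all lines strip to blank: A's dropWhile empties st, B's guard returns []
    have hc' : (st.map p).contains true = false := by simpa using hc
    rw [hc', Bool.not_false, if_pos rfl]
    have : st.dropWhile (fun s => !(p s)) = [] := by
      rw [List.dropWhile_eq_nil_iff]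
      intro x hx
      by_contra hne
      exact hc (by
        have : p x = true := by simpa using hne
        simpa using List.mem_map.mpr ⟨x, hx, this⟩)
    rw [this]
    simp
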